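-- pv_equiv track=rewrite | github.com/Jungkihong07/codingTest | week_6_programming/problem_17608.py | count_num
-- ===== SOURCE A (Python) =====
-- def count_num(list_n):
--     min = 0
--     count = 0
--     for i in list_n:
--         if min < i:
--             min = i
--             count += 1
--     return count
-- ===== SOURCE B (Python) =====
-- def count_num(list_n):
--     # pass 1: prefix[i] = max(0, list_n[0..i-1])
--     prefix = []
--     m = 0
--     for x in list_n:
--         prefix.append(m)
--         if x > m:
--             m = x
--     # pass 2: count positions strictly above their prefix maximum
--     return sum(1 for x, p in zip(list_n, prefix) if x > p)
-- ===== Notes on version B (the rewrite author's own statement) =====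
-- stated objective: alternative
-- what changed: Replaced the single fused scan with mutable running-max state by a two-pass decomposition: build a prefix-maximum table, then count indices where the element strictly exceeds its prefix maximum.
import Mathlib
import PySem

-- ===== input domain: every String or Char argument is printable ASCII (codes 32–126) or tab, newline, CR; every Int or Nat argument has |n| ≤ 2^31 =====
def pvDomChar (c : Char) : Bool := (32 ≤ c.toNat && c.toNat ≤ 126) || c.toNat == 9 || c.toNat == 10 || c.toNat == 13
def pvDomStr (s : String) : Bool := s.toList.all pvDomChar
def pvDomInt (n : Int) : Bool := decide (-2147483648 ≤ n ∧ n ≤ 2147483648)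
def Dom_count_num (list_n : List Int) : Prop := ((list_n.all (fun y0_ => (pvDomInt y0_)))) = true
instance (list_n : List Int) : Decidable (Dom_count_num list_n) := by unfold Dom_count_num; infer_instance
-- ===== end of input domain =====

-- B is a two-pass decomposition (prefix-maximum table, then a count over the zipped pairs);
-- A is a single fused scan. Same value on every input; no speed claim.

-- ===== PORT A =====
-- fold carries A's two mutable variables (min, count)
def count_num (list_n : List Int) : Int :=
  (list_n.foldl (fun (s : Int × Int) i => if s.1 < i then (i, s.2 + 1) else s) (0, 0)).2

-- ===== PORT B =====
-- pass 1 of Source B: the prefix-maximum table (m starts at 0)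
def pvPrefixMax (l : List Int) (m : Int) : List Int :=
  match l with
  | [] => []
  | x :: xs => m :: pvPrefixMax xs (if x > m then x else m)

-- pass 2 of Source B: count pairs (x, p) with x > p
def count_num_alt (list_n : List Int) : Int :=
  (list_n.zip (pvPrefixMax list_n 0)).foldl
    (fun (c : Int) (p : Int × Int) => if p.1 > p.2 then c + 1 else c) 0

-- ===== PRECONDITION & SPEC =====
def Spec_count_num (list_n : List Int) (out : Int) : Prop := out = count_num_alt list_n
instance (list_n : List Int) (out : Int) : Decidable (Spec_count_num list_n out) := by unfold Spec_count_num; infer_instance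

-- ===== CLAIM (what is proved, stated in full; the proofs are below) =====
def Claim_equal_count_num : Prop := ∀ (list_n : List Int), Dom_count_num list_n → Spec_count_num list_n (count_num list_n)

-- ===== LEMMAS AND PROOFS =====
theorem pv_count_eq : ∀ (l : List Int) (m c : Int),
    (l.foldl (fun (s : Int × Int) i => if s.1 < i then (i, s.2 + 1) else s) (m, c)).2
      = (l.zip (pvPrefixMax l m)).foldl
          (fun (c : Int) (p : Int × Int) => if p.1 > p.2 then c + 1 else c) c := by
  intro l
  induction l with
  | nil => intro m c; rfl
  | cons x xs ih =>
    intro m c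
    simp only [List.foldl, pvPrefixMax, List.zip_cons_cons]
    by_cases h : m < x
    · simp [h, gt_iff_lt, ih]
    · simp [h, gt_iff_lt, ih]

-- ===== VERDICT (by name: the statement is the Claim_ definition above) =====
theorem count_num_spec : Claim_equal_count_num := by
  intro l _
  unfold Spec_count_num count_num count_num_alt
  exact pv_count_eq l 0 0
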